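-- pv_equiv track=rewrite | github.com/a-brandon/practice | edabit/elastic_words.py | even_stretch
-- ===== SOURCE A (Python) =====
-- def even_stretch(word):
--     end = len(word) // 2
--     s = []
--
--     for i, ch in enumerate(word, start=1):
--         if i <= end:
--             s.append(i * ch)
--         else:
--             s.append(end * ch)
--             end -= 1
--
--     return ''.join(s)
-- ===== SOURCE B (Python) =====
-- def even_stretch(word):
--     odd = len(word) % 2
--     left, right = [], []
--     l, r, depth = 0, len(word) - 1, 1
--     while l < r:
--         left.append(depth * word[l])
--         right.append((depth - odd) * word[r])
--         l += 1
--         r -= 1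
--         depth += 1
--     if l == r:
--         left.append((depth - odd) * word[l])
--     return ''.join(left) + ''.join(reversed(right))
-- ===== Notes on version B (the rewrite author's own statement) =====
-- stated objective: alternative
-- what changed: Replaces A's single left-to-right pass with a decrementing `end` counter by a two-pointer middle-out construction: peel a character from each end per step, emit depth copies on the left and depth-minus-parity copies on the right, then join the left pieces with the reversed right pieces.
import Mathlib
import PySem

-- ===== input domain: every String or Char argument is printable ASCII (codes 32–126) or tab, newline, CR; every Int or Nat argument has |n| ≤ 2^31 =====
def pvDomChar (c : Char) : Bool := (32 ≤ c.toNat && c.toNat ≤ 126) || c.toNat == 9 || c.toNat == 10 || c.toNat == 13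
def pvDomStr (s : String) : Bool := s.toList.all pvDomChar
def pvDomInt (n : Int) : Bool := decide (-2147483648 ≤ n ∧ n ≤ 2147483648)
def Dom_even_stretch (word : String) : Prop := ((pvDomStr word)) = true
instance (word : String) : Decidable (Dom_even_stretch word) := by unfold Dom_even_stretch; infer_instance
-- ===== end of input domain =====

-- B replaces A's left-to-right pass (decrementing `end` counter) by a two-pointer middle-out
-- construction peeling a character from each end per step; same output, same cost.

-- ===== PORT A =====
-- the for-loop of A: position i (1-based), mutable `end` e, building the list s of string pieces
def esALoop : List Char → Int → Int → List String
  | [], _, _ => []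
  | ch :: rest, i, e =>
    if i ≤ e then
      String.mk (List.replicate i.toNat ch) :: esALoop rest (i + 1) e
    else
      String.mk (List.replicate e.toNat ch) :: esALoop rest (i + 1) (e - 1)

def even_stretch (word : String) : String :=
  String.join (esALoop word.toList 1 ((word.toList.length / 2 : Nat) : Int))

-- ===== PORT B =====
-- the while-loop of B plus the trailing `if l == r` branch; `left`/`right` are the two
-- accumulator lists.  word[l] / word[r] is ported as (PySem.List.pyGet? w l).getD 'a':
-- every index the loop uses is in range (0 ≤ l ≤ r < len w), so the default is never taken.
def esBLoop (w : List Char) (o : Int) :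
    Int → Int → Int → List String → List String → List String × List String
  | l, r, depth, left, right =>
    if l < r then
      esBLoop w o (l + 1) (r - 1) (depth + 1)
        (left ++ [String.mk (List.replicate depth.toNat ((PySem.List.pyGet? w l).getD 'a'))])
        (right ++ [String.mk (List.replicate (depth - o).toNat ((PySem.List.pyGet? w r).getD 'a'))])
    else if l = r then
      (left ++ [String.mk (List.replicate (depth - o).toNat ((PySem.List.pyGet? w l).getD 'a'))],
       right)
    else
      (left, right)
  termination_by l r _ _ _ => (r - l).toNat
  decreasing_by omega

def even_stretch_alt (word : String) : String :=
  let o : Int := (word.toList.length : Int) % 2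
  let res := esBLoop word.toList o 0 ((word.toList.length : Int) - 1) 1 [] []
  String.join res.1 ++ String.join res.2.reverse

-- ===== PRECONDITION & SPEC =====
def Spec_even_stretch (word : String) (out : String) : Prop := out = even_stretch_alt word
instance (word : String) (out : String) : Decidable (Spec_even_stretch word out) := by unfold Spec_even_stretch; infer_instance

-- ===== CLAIM (what is proved, stated in full; the proofs are below) =====
def Claim_equal_even_stretch : Prop := ∀ (word : String), Dom_even_stretch word → Spec_even_stretch word (even_stretch word)

-- ===== LEMMAS AND PROOFS =====

-- proof-side middle-out recursion on the remaining segment (esBLoop without indices/accumulators)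
def esGo (o : Int) : List Char → Int → String
  | [], _ => ""
  | [c], d => String.mk (List.replicate (d - o).toNat c)
  | c :: c2 :: rest, d =>
      String.mk (List.replicate d.toNat c)
        ++ esGo o (List.dropLast (c2 :: rest)) (d + 1)
        ++ String.mk (List.replicate (d - o).toNat ((c2 :: rest).getLast (by simp)))
  termination_by cs _ => cs.length
  decreasing_by simp [List.length_dropLast]

-- common closed form: character at 1-based position p gets min(d-1+p, L+d-o-p) copies
def esTent (o d L : Int) (p : Int × Char) : String :=
  String.mk (List.replicate (min (d - 1 + p.1) (L + d - o - p.1)).toNat p.2)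

def esSpell (o d : Int) (cs : List Char) : String :=
  String.join ((PySem.List.enumerate cs 1).map (esTent o d (cs.length : Int)))

-- the still-unprocessed segment w[l..r] (both ends inclusive)
def esSeg (w : List Char) (l r : Int) : List Char :=
  (w.drop l.toNat).take (r + 1 - l).toNat

theorem join_foldl_shift (l : List String) : ∀ a : String,
    List.foldl (fun r s => r ++ s) a l = a ++ List.foldl (fun r s => r ++ s) "" l := by
  induction l with
  | nil => intro a; simp
  | cons x xs ih =>
    intro a
    simp only [List.foldl_cons]
    rw [ih (a ++ x), ih ("" ++ x)]
    simp [String.append_assoc]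

theorem join_cons (a : String) (l : List String) :
    String.join (a :: l) = a ++ String.join l := by
  simp only [String.join, List.foldl_cons]
  rw [join_foldl_shift]
  simp

theorem join_append (l1 l2 : List String) :
    String.join (l1 ++ l2) = String.join l1 ++ String.join l2 := by
  simp only [String.join, List.foldl_append]
  rw [join_foldl_shift]

theorem join_singleton (a : String) : String.join [a] = a := by
  simp [String.join]

theorem join_nil : String.join ([] : List String) = "" := rfl

-- invariant for A's loop: at position i the mutable `end` equals min e0 (2*e0+1-i)
theorem esALoop_eq_map (cs : List Char) (e0 : Nat) :
    ∀ i : Int, 1 ≤ i →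
      esALoop cs i (min (e0 : Int) (2 * e0 + 1 - i)) =
        (PySem.List.enumerate cs i).map
          (fun p => String.mk (List.replicate (min p.1 (2 * (e0 : Int) + 1 - p.1)).toNat p.2)) := by
  induction cs with
  | nil => intro i _; simp [esALoop, PySem.List.enumerate_nil]
  | cons ch rest ih =>
    intro i hi
    rw [PySem.List.enumerate_cons, List.map_cons]
    by_cases h : i ≤ (e0 : Int)
    · have hle : i ≤ min (e0 : Int) (2 * e0 + 1 - i) := by omega
      have h1 : min i (2 * (e0 : Int) + 1 - i) = i := by omega
      have h2 : min (e0 : Int) (2 * e0 + 1 - i) = min (e0 : Int) (2 * e0 + 1 - (i + 1)) := by omega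
      rw [esALoop, if_pos hle, h2, ih (i + 1) (by omega)]
      simp [h1]
    · have hgt : ¬ i ≤ min (e0 : Int) (2 * e0 + 1 - i) := by omega
      have h1 : min (e0 : Int) (2 * e0 + 1 - i) = min i (2 * (e0 : Int) + 1 - i) := by omega
      have h2 : min (e0 : Int) (2 * e0 + 1 - i) - 1 = min (e0 : Int) (2 * e0 + 1 - (i + 1)) := by omega
      rw [esALoop, if_neg hgt, h2, ih (i + 1) (by omega)]
      simp [h1]

-- shifting the start index of enumerate shifts the projected index
theorem map_enumerate_shift {α β : Type} (f : Int × α → β) (cs : List α) (s k : Int) :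
    (PySem.List.enumerate cs (s + k)).map f
      = (PySem.List.enumerate cs s).map (fun p => f (p.1 + k, p.2)) := by
  induction cs generalizing s with
  | nil => simp [PySem.List.enumerate_nil]
  | cons c rest ih =>
    rw [PySem.List.enumerate_cons, PySem.List.enumerate_cons, List.map_cons, List.map_cons]
    have : s + k + 1 = (s + 1) + k := by ring
    rw [this, ih (s + 1)]

-- the middle-out recursion produces the closed-form spelling
theorem esGo_eq_spell (o : Int) (ho : 0 ≤ o ∧ o ≤ 1) :
    ∀ (cs : List Char) (d : Int), 1 ≤ d → esGo o cs d = esSpell o d cs := by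
  intro cs d
  induction cs, d using esGo.induct with
  | case1 d => intro _; simp [esGo, esSpell, PySem.List.enumerate_nil, String.join]
  | case2 c d =>
    intro hd
    have h1 : min (d - 1 + 1) ((([c] : List Char).length : Int) + d - o - 1) = d - o := by
      simp only [List.length_cons, List.length_nil]; omega
    simp only [esGo, esSpell, PySem.List.enumerate_cons, PySem.List.enumerate_nil,
      List.map_cons, List.map_nil, esTent, h1]
    simp [String.join]
  | case3 c c2 rest d ih =>
    intro hd
    have hne : (c2 :: rest : List Char) ≠ [] := by simp
    have hsplit : c2 :: rest = List.dropLast (c2 :: rest) ++ [(c2 :: rest).getLast hne] :=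
      (List.dropLast_append_getLast hne).symm
    set front := List.dropLast (c2 :: rest) with hfront
    set lastc := (c2 :: rest).getLast hne with hlast
    rw [esGo, esSpell]
    conv_rhs => rw [show (c :: c2 :: rest : List Char) = c :: (front ++ [lastc]) by
      rw [← hsplit]]
    rw [PySem.List.enumerate_cons, PySem.List.enumerate_append, List.map_cons, List.map_append,
      join_cons, join_append]
    rw [PySem.List.enumerate_cons, PySem.List.enumerate_nil, List.map_cons, List.map_nil]
    have hLen : ((c :: (front ++ [lastc])).length : Int) = (front.length : Int) + 2 := by
      simp only [List.length_cons, List.length_append, List.length_nil]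
      push_cast
      ring
    have hfirst : esTent o d ((c :: (front ++ [lastc])).length : Int) (1, c)
        = String.mk (List.replicate d.toNat c) := by
      simp only [esTent, hLen]
      have : min (d - 1 + 1) ((front.length : Int) + 2 + d - o - 1) = d := by omega
      rw [this]
    have hlastv : esTent o d ((c :: (front ++ [lastc])).length : Int)
          (1 + 1 + (front.length : Int), lastc)
        = String.mk (List.replicate (d - o).toNat lastc) := by
      simp only [esTent, hLen]
      have : min (d - 1 + (1 + 1 + (front.length : Int)))
          ((front.length : Int) + 2 + d - o - (1 + 1 + (front.length : Int))) = d - o := by omega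
      rw [this]
    have hmid : String.join ((PySem.List.enumerate front (1 + 1)).map
          (esTent o d ((c :: (front ++ [lastc])).length : Int))) = esGo o front (d + 1) := by
      rw [map_enumerate_shift (esTent o d ((c :: (front ++ [lastc])).length : Int)) front 1 1]
      rw [ih (by omega)]
      unfold esSpell
      congr 1
      apply List.map_congr_left
      intro p _
      simp only [esTent, hLen]
      have : min (d - 1 + (p.1 + 1)) ((front.length : Int) + 2 + d - o - (p.1 + 1))
          = min (d + 1 - 1 + p.1) ((front.length : Int) + (d + 1) - o - p.1) := by omega
      rw [this]
    rw [hfirst, hlastv, hmid, String.join]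
    simp only [List.foldl_cons, List.foldl_nil]
    rw [show ("" : String) ++ String.mk (List.replicate (d - o).toNat lastc)
          = String.mk (List.replicate (d - o).toNat lastc) by simp]
    rw [String.append_assoc]

-- esGo on a ≥2-element segment, written with its two ends explicit
theorem esGo_two (o d : Int) (c lastc : Char) (mid : List Char) :
    esGo o (c :: (mid ++ [lastc])) d
      = String.mk (List.replicate d.toNat c) ++ esGo o mid (d + 1)
        ++ String.mk (List.replicate (d - o).toNat lastc) := by
  cases mid with
  | nil => simp [esGo]
  | cons m ms =>
    rw [show (c :: ((m :: ms) ++ [lastc]) : List Char) = c :: m :: (ms ++ [lastc]) by simp]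
    rw [esGo]
    rw [show List.dropLast (m :: (ms ++ [lastc])) = m :: ms by
      rw [show (m :: (ms ++ [lastc]) : List Char) = (m :: ms) ++ [lastc] by simp,
        List.dropLast_concat]]
    rw [show (m :: (ms ++ [lastc]) : List Char).getLast (by simp) = lastc by
      simp]

-- a valid index read through pyGet?
theorem pyGetD_of_range (w : List Char) (l : Int) (h0 : 0 ≤ l) (h1 : l < (w.length : Int)) :
    (PySem.List.pyGet? w l).getD 'a' = w[l.toNat]'(by omega) := by
  have h : PySem.List.pyGet? w l = w[l.toNat]? := by
    conv_lhs => rw [show l = ((l.toNat : Nat) : Int) by omega]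
    exact PySem.List.pyGet?_natCast ..
  rw [h, List.getElem?_eq_getElem (by omega)]
  rfl

-- splitting off the left end of a segment
theorem esSeg_cons (w : List Char) (l r : Int) (h0 : 0 ≤ l) (hlr : l ≤ r)
    (hr : r < (w.length : Int)) :
    esSeg w l r = w[l.toNat]'(by omega) :: esSeg w (l + 1) r := by
  unfold esSeg
  rw [List.drop_eq_getElem_cons (by omega)]
  rw [show (r + 1 - l).toNat = (r + 1 - (l + 1)).toNat + 1 by omega]
  rw [List.take_succ_cons]
  rw [show (l + 1).toNat = l.toNat + 1 by omega]

-- splitting off the right end of a segment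
theorem esSeg_concat (w : List Char) (l r : Int) (h0 : 0 ≤ l) (hlr : l ≤ r)
    (hr : r < (w.length : Int)) :
    esSeg w l r = esSeg w l (r - 1) ++ [w[r.toNat]'(by omega)] := by
  unfold esSeg
  rw [show (r + 1 - l).toNat = (r - 1 + 1 - l).toNat + 1 by omega, List.take_succ]
  congr 1
  rw [List.getElem?_drop]
  rw [List.getElem?_eq_getElem (by omega)]
  simp only [Option.toList_some]
  congr 2
  omega

-- the two-pointer loop equals the middle-out recursion on the remaining segment
theorem esBLoop_eq_go (w : List Char) (o : Int) :
    ∀ (l r depth : Int) (left right : List String), 0 ≤ l → r < (w.length : Int) →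
      String.join (esBLoop w o l r depth left right).1
          ++ String.join (esBLoop w o l r depth left right).2.reverse
        = String.join left ++ esGo o (esSeg w l r) depth ++ String.join right.reverse := by
  intro l r depth left right
  induction l, r, depth, left, right using esBLoop.induct (w := w) (o := o) with
  | case1 l r depth left right hlr ih =>
    intro h0 hr
    rw [esBLoop, if_pos hlr]
    rw [ih (by omega) (by omega)]
    have hseg : esSeg w l r
        = w[l.toNat]'(by omega) :: (esSeg w (l + 1) (r - 1) ++ [w[r.toNat]'(by omega)]) := by
      rw [esSeg_cons w l r h0 (by omega) hr, esSeg_concat w (l + 1) r (by omega) (by omega) hr]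
    rw [hseg, esGo_two]
    rw [pyGetD_of_range w l h0 (by omega), pyGetD_of_range w r (by omega) hr]
    simp [join_append, join_nil, join_cons, List.reverse_append, String.append_assoc]
  | case2 r depth left right hlr =>
    intro h0 hr
    rw [esBLoop, if_neg hlr, if_pos rfl]
    have hseg : esSeg w r r = [w[r.toNat]'(by omega)] := by
      rw [esSeg_cons w r r h0 (by omega) hr]
      have : esSeg w (r + 1) r = [] := by
        unfold esSeg
        rw [show (r + 1 - (r + 1)).toNat = 0 by omega]
        simp
      rw [this]
    rw [hseg]
    rw [show esGo o [w[r.toNat]'(by omega)] depth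
          = String.mk (List.replicate (depth - o).toNat (w[r.toNat]'(by omega))) by rw [esGo]]
    rw [pyGetD_of_range w r h0 (by omega)]
    simp [join_append, join_singleton, String.append_assoc]
  | case3 l r depth left right hlr heq =>
    intro h0 hr
    rw [esBLoop, if_neg hlr, if_neg heq]
    have hseg : esSeg w l r = [] := by
      unfold esSeg
      rw [show (r + 1 - l).toNat = 0 by omega]
      simp
    rw [hseg]
    rw [show esGo o ([] : List Char) depth = "" by rw [esGo]]
    simp

-- ===== VERDICT (by name: the statement is the Claim_ definition above) =====
theorem even_stretch_spec : Claim_equal_even_stretch := by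
  intro word _
  unfold Spec_even_stretch even_stretch even_stretch_alt
  have hA := esALoop_eq_map word.toList (word.toList.length / 2) 1 le_rfl
  have h0 : ((word.toList.length / 2 : Nat) : Int) =
      min ((word.toList.length / 2 : Nat) : Int) (2 * (word.toList.length / 2 : Nat) + 1 - 1) := by
    omega
  rw [h0, hA]
  have hB := esBLoop_eq_go word.toList ((word.toList.length : Int) % 2) 0
      ((word.toList.length : Int) - 1) 1 [] [] (by omega) (by omega)
  simp only []
  rw [hB]
  have hseg : esSeg word.toList 0 ((word.toList.length : Int) - 1) = word.toList := by
    unfold esSeg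
    simp
  rw [hseg]
  rw [esGo_eq_spell ((word.toList.length : Int) % 2) (by omega) word.toList 1 le_rfl]
  unfold esSpell
  have hmap : (PySem.List.enumerate word.toList 1).map
        (fun p => String.mk (List.replicate
          (min p.1 (2 * ((word.toList.length / 2 : Nat) : Int) + 1 - p.1)).toNat p.2))
      = (PySem.List.enumerate word.toList 1).map
          (esTent ((word.toList.length : Int) % 2) 1 (word.toList.length : Int)) := by
    apply List.map_congr_left
    intro p _
    simp only [esTent]
    have : min p.1 (2 * ((word.toList.length / 2 : Nat) : Int) + 1 - p.1)
        = min (1 - 1 + p.1)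
            ((word.toList.length : Int) + 1 - (word.toList.length : Int) % 2 - p.1) := by
      omega
    rw [this]
  rw [hmap]
  simp [join_nil]
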